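-- pv_equiv track=rewrite | github.com/alejandroSilgado/Introduccion-programacion | Pyhton/Funciones y variables globales/digito_verificador.py | calculardigito
-- ===== SOURCE A (Python) =====
-- def calculardigito(numero_al_revez ,digitos_numero) :
--     suma=0
--     for i in range (2,digitos_numero+2) :
--         if i<=7 :
--             suma=suma+(int(numero_al_revez[i-2])*i)
--         elif i>7:
--             suma=suma+(int(numero_al_revez[i-2])*i-6)
--     return suma
-- ===== SOURCE B (Python) =====
-- def calculardigito(numero_al_revez, digitos_numero):
--     digits = [int(c) for c in numero_al_revez[:max(digitos_numero, 0)]]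
--
--     def go(k):
--         if k == 0:
--             return 0
--         i = k + 1
--         return go(k - 1) + digits[k - 1] * i - (6 if i > 7 else 0)
--
--     return go(len(digits))
-- ===== Notes on version B (the rewrite author's own statement) =====
-- stated objective: alternative
-- what changed: B works in two stages: it first parses the relevant prefix into a list of digit values, then computes the weighted sum by structural recursion from the last digit down (building the result back-to-front), with the i>7 penalty as a subtracted 6-or-0 term instead of A's single forward loop with an if/elif branch inside.
import Mathlib
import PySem

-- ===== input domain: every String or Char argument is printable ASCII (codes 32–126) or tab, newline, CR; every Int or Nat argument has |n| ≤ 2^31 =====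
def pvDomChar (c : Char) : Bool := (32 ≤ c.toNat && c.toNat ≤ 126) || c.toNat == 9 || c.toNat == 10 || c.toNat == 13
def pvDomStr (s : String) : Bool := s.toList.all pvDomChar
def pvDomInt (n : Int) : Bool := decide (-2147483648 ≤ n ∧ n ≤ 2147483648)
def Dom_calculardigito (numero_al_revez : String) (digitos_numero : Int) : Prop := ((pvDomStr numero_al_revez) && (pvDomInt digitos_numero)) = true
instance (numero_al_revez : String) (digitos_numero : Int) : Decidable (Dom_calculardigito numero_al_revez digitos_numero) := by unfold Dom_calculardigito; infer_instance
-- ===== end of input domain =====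

-- B first parses the prefix into a list of digit values, then sums by structural recursion
-- from the last digit down, instead of A's single forward loop with an if/elif branch
-- (objective: alternative decomposition, same asymptotic cost).

-- ===== PORT A =====
-- int(numero_al_revez[i-2]): indexing via PySem.Str.pyGet?, int() via PySem.Int.ofChars?;
-- the defaults behind .getD are never reached under Pre_ (in range, digit characters).
def calculardigito (numero_al_revez : String) (digitos_numero : Int) : Int :=
  (PySem.List.pyRange 2 (digitos_numero + 2) 1).foldl
    (fun suma i =>
      if i ≤ 7 then
        suma + ((PySem.Str.pyGet? numero_al_revez (i - 2)).bind
                  (fun c => PySem.Int.ofChars? [c])).getD 0 * i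
      else if 7 < i then
        suma + (((PySem.Str.pyGet? numero_al_revez (i - 2)).bind
                  (fun c => PySem.Int.ofChars? [c])).getD 0 * i - 6)
      else suma) 0

-- ===== PORT B =====
-- the inner recursive helper go of Source B (structural recursion on k; digits[k-1] via getD,
-- its default unreachable since go is only called with k ≤ len(digits))
def pvGoB (digits : List Int) : Nat → Int
  | 0 => 0
  | k + 1 => pvGoB digits k + digits.getD k 0 * ((k : Int) + 1 + 1) -
      (if (7 : Int) < (k : Int) + 1 + 1 then 6 else 0)

def calculardigito_alt (numero_al_revez : String) (digitos_numero : Int) : Int :=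
  let digits : List Int :=
    (PySem.Chars.slice numero_al_revez.toList none (some (max digitos_numero 0))).map
      (fun c => (PySem.Int.ofChars? [c]).getD 0)
  pvGoB digits digits.length

-- ===== PRECONDITION & SPEC =====
-- Pre_ is exactly where Python A returns: every visited index is inside the string
-- (else IndexError) and every visited character is a decimal digit (else ValueError).
def Pre_calculardigito (numero_al_revez : String) (digitos_numero : Int) : Prop :=
  digitos_numero ≤ (numero_al_revez.toList.length : Int) ∧
  (numero_al_revez.toList.take digitos_numero.toNat).all Char.isDigit = true
instance (numero_al_revez : String) (digitos_numero : Int) : Decidable (Pre_calculardigito numero_al_revez digitos_numero) := by unfold Pre_calculardigito; infer_instance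

def pvWitness_calculardigito : String × Int := ("12", 2)

def Spec_calculardigito (numero_al_revez : String) (digitos_numero : Int) (out : Int) : Prop := out = calculardigito_alt numero_al_revez digitos_numero
instance (numero_al_revez : String) (digitos_numero : Int) (out : Int) : Decidable (Spec_calculardigito numero_al_revez digitos_numero out) := by unfold Spec_calculardigito; infer_instance

-- ===== CLAIM (what is proved, stated in full; the proofs are below) =====
def Claim_equal_calculardigito : Prop := ∀ (numero_al_revez : String) (digitos_numero : Int), Dom_calculardigito numero_al_revez digitos_numero → Pre_calculardigito numero_al_revez digitos_numero → Spec_calculardigito numero_al_revez digitos_numero (calculardigito numero_al_revez digitos_numero)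

-- ===== LEMMAS AND PROOFS =====

-- B's back-to-front recursion computes the per-index sum over List.range
theorem pvGoB_eq_sum (digits : List Int) (m : Nat) :
    pvGoB digits m =
      ((List.range m).map (fun (k : Nat) =>
        digits.getD k 0 * ((k : Int) + 2) - (if (7 : Int) < (k : Int) + 2 then 6 else 0))).sum := by
  induction m with
  | zero => simp [pvGoB]
  | succ m ih =>
    rw [List.range_succ, List.map_append, List.sum_append]
    simp only [pvGoB, List.map_cons, List.map_nil, List.sum_cons, List.sum_nil, ih]
    ring_nf

theorem calculardigito_spec : Claim_equal_calculardigito := by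
  intro s d _hdom hpre
  unfold Spec_calculardigito calculardigito calculardigito_alt
  dsimp only
  obtain ⟨hlen, -⟩ := hpre
  -- A side: turn the branched fold into 0 + sum of mapped terms
  have hfun :
      (fun (suma i : Int) =>
        if i ≤ 7 then
          suma + ((PySem.Str.pyGet? s (i - 2)).bind (fun c => PySem.Int.ofChars? [c])).getD 0 * i
        else if 7 < i then
          suma + (((PySem.Str.pyGet? s (i - 2)).bind (fun c => PySem.Int.ofChars? [c])).getD 0 * i - 6)
        else suma)
      = fun (suma i : Int) =>
          suma + (if i ≤ 7 then
            ((PySem.Str.pyGet? s (i - 2)).bind (fun c => PySem.Int.ofChars? [c])).getD 0 * i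
          else
            ((PySem.Str.pyGet? s (i - 2)).bind (fun c => PySem.Int.ofChars? [c])).getD 0 * i - 6) := by
    funext suma i
    by_cases h : i ≤ 7
    · simp [h]
    · simp [h, show (7:Int) < i by omega]
  rw [hfun, PySem.List.pyRange_one, List.foldl_map, PySem.List.foldl_add, zero_add]
  have hn2 : (d + 2 - 2) = d := by ring
  rw [hn2, pvGoB_eq_sum]
  by_cases hd : d ≤ 0
  · -- empty range on both sides
    have h1 : d.toNat = 0 := by omega
    have hm : max d 0 = 0 := by omega
    have hsl : PySem.List.slice s.toList none (some (0 : Int)) = [] := by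
      have := PySem.List.slice_to s.toList (b := 0) le_rfl
      simpa using this
    simp [h1, hm, hsl, PySem.Chars.slice]
  · rw [not_le] at hd
    have hmax : max d 0 = d := by omega
    have hslice : PySem.Chars.slice s.toList none (some (max d 0)) = s.toList.take d.toNat := by
      simp only [PySem.Chars.slice]
      rw [hmax]; exact PySem.List.slice_to s.toList (by omega)
    rw [hslice]
    have hlenpref : ((s.toList.take d.toNat).map (fun c => (PySem.Int.ofChars? [c]).getD 0)).length = d.toNat := by
      rw [List.length_map, List.length_take]; omega
    rw [hlenpref]
    have hAB : ∀ k ∈ List.range d.toNat,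
        (if ((2:Int) + k) ≤ 7 then
          ((PySem.Str.pyGet? s ((2:Int) + k - 2)).bind (fun c => PySem.Int.ofChars? [c])).getD 0 * ((2:Int) + k)
        else
          ((PySem.Str.pyGet? s ((2:Int) + k - 2)).bind (fun c => PySem.Int.ofChars? [c])).getD 0 * ((2:Int) + k) - 6)
        = ((s.toList.take d.toNat).map (fun c => (PySem.Int.ofChars? [c]).getD 0)).getD k 0 * ((k : Int) + 2)
            - (if (7 : Int) < (k : Int) + 2 then 6 else 0) := by
      intro k hk
      rw [List.mem_range] at hk
      have hklen : k < s.toList.length := by omega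
      have hidx : ((2:Int) + k - 2) = (k : Int) := by ring
      rw [hidx, PySem.Str.pyGet?_natCast, List.getElem?_eq_getElem hklen]
      have hget : ((s.toList.take d.toNat).map (fun c => (PySem.Int.ofChars? [c]).getD 0)).getD k 0
          = (PySem.Int.ofChars? [s.toList[k]]).getD 0 := by
        have hkm : k < ((s.toList.take d.toNat).map (fun c => (PySem.Int.ofChars? [c]).getD 0)).length := by
          rw [List.length_map, List.length_take]; omega
        rw [List.getD_eq_getElem?_getD, List.getElem?_eq_getElem hkm]
        simp [List.getElem_take]
      rw [hget]
      simp only [Option.bind_some]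
      set g : Int := (PySem.Int.ofChars? [s.toList[k]]).getD 0 with hg
      have h2 : (2:Int) + k = (k : Int) + 2 := by ring
      rw [h2]
      by_cases h7 : ((k : Int) + 2) ≤ 7
      · rw [if_pos h7, if_neg (by omega)]; ring
      · rw [if_neg h7, if_pos (by omega)]
    rw [List.map_congr_left hAB]
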